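-- pv_equiv track=rewrite | github.com/lucianoscarpaci/Technical-Interview-Prep | Unit3/PartD/p1.py | final_supply_costs
-- ===== SOURCE A (Python) =====
-- def final_supply_costs(costs):
--     n = len(costs)
--     stack = []
--     final_costs = costs[:]
--
--     for i in range(n):
--         while stack and costs[stack[-1]] >= costs[i]:
--             j = stack.pop()
--             final_costs[j] -= costs[i]
--         stack.append(i)
--     return final_costs
-- ===== SOURCE B (Python) =====
-- def final_supply_costs(costs):
--     n = len(costs)
--     res = []
--     for i in range(n):
--         d = 0
--         for j in range(i + 1, n):
--             if costs[j] <= costs[i]: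
--                 d = costs[j]
--                 break
--         res.append(costs[i] - d)
--     return res
-- ===== Notes on version B (the rewrite author's own statement) =====
-- stated objective: simpler
-- what changed: Replaces the monotonic-stack single pass (stack of pending indices, pop-and-discount on >=) with a direct nested scan: for each i, subtract the first later element <= costs[i].
import Mathlib
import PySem

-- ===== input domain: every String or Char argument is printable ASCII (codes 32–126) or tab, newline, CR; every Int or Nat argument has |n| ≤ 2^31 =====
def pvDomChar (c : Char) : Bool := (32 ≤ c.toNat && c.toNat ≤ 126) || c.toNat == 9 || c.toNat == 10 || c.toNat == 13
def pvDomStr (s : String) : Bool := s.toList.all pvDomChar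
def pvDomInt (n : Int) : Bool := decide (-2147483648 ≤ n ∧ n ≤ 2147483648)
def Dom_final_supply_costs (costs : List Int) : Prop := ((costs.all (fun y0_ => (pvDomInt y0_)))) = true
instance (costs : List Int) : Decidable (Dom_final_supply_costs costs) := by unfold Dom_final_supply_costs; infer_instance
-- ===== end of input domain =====

-- B replaces A's monotonic-stack pass with a plain nested scan for the first later element <= costs[i]; simpler, same return value.


-- ===== PORT A =====
-- the inner 'while stack and costs[stack[-1]] >= costs[i]' loop (stack top = list head)
def pvPopLoop (costs : List Int) (ci : Int) : List Nat → List Int → List Nat × List Int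
  | [], fin => ([], fin)
  | j :: st, fin =>
      if costs.getD j 0 ≥ ci then
        pvPopLoop costs ci st (fin.set j (fin.getD j 0 - ci))
      else (j :: st, fin)

def final_supply_costs (costs : List Int) : List Int :=
  ((List.range costs.length).foldl
    (fun s i =>
      let p := pvPopLoop costs (costs.getD i 0) s.1 s.2
      (i :: p.1, p.2))
    (([] : List Nat), costs)).2

-- ===== PORT B =====
-- the inner 'for j in range(i+1, n): if costs[j] <= costs[i]: d = costs[j]; break' (d defaults to 0)
def pvFindLE (c : Int) : List Int → Int
  | [] => 0
  | x :: xs => if x ≤ c then x else pvFindLE c xs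

def final_supply_costs_alt : List Int → List Int
  | [] => []
  | c :: rest => (c - pvFindLE c rest) :: final_supply_costs_alt rest

-- ===== PRECONDITION & SPEC =====
def Spec_final_supply_costs (costs : List Int) (out : List Int) : Prop := out = final_supply_costs_alt costs
instance (costs : List Int) (out : List Int) : Decidable (Spec_final_supply_costs costs out) := by unfold Spec_final_supply_costs; infer_instance

-- ===== CLAIM (what is proved, stated in full; the proofs are below) =====
def Claim_equal_final_supply_costs : Prop := ∀ (costs : List Int), Dom_final_supply_costs costs → Spec_final_supply_costs costs (final_supply_costs costs)

-- ===== LEMMAS AND PROOFS =====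

-- first element ≤ c, as an Option (proof-side helper)
def firstLE? (c : Int) : List Int → Option Int
  | [] => none
  | x :: xs => if x ≤ c then some x else firstLE? c xs

theorem firstLE?_eq_none {c : Int} {l : List Int} (h : ∀ y ∈ l, ¬ y ≤ c) :
    firstLE? c l = none := by
  induction l with
  | nil => rfl
  | cons x xs ih =>
      simp [firstLE?, h x (by simp)]
      exact ih (fun y hy => h y (by simp [hy]))

theorem firstLE?_append_none {c : Int} {l1 l2 : List Int} (h : firstLE? c l1 = none) :
    firstLE? c (l1 ++ l2) = firstLE? c l2 := by
  induction l1 with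
  | nil => rfl
  | cons x xs ih =>
      by_cases hx : x ≤ c
      · simp [firstLE?, hx] at h
      · simp [firstLE?, hx] at h ⊢; exact ih h

theorem firstLE?_append_some {c v : Int} {l1 l2 : List Int} (h : firstLE? c l1 = some v) :
    firstLE? c (l1 ++ l2) = some v := by
  induction l1 with
  | nil => simp [firstLE?] at h
  | cons x xs ih =>
      by_cases hx : x ≤ c
      · simp [firstLE?, hx] at h ⊢; exact h
      · simp [firstLE?, hx] at h ⊢; exact ih h

theorem pvFindLE_of_firstLE?_some {c v : Int} {l : List Int} (h : firstLE? c l = some v) :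
    pvFindLE c l = v := by
  induction l with
  | nil => simp [firstLE?] at h
  | cons x xs ih =>
      by_cases hx : x ≤ c
      · simp only [firstLE?, if_pos hx, Option.some.injEq] at h
        subst h; simp [pvFindLE, hx]
      · simp [firstLE?, hx] at h; simp [pvFindLE, hx]; exact ih h

theorem pvFindLE_of_firstLE?_none {c : Int} {l : List Int} (h : firstLE? c l = none) :
    pvFindLE c l = 0 := by
  induction l with
  | nil => rfl
  | cons x xs ih =>
      by_cases hx : x ≤ c
      · simp [firstLE?, hx] at h
      · simp [firstLE?, hx] at h; simp [pvFindLE, hx]; exact ih h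

theorem alt_length (l : List Int) : (final_supply_costs_alt l).length = l.length := by
  induction l with
  | nil => rfl
  | cons c rest ih => simp [final_supply_costs_alt, ih]

theorem alt_getD (l : List Int) (j : Nat) (hj : j < l.length) :
    (final_supply_costs_alt l).getD j 0 =
      l.getD j 0 - pvFindLE (l.getD j 0) (l.drop (j+1)) := by
  induction l generalizing j with
  | nil => simp at hj
  | cons c rest ih =>
      cases j with
      | zero => simp [final_supply_costs_alt]
      | succ j =>
          simp only [final_supply_costs_alt, List.getD_cons_succ, List.drop_succ_cons]
          exact ih j (by simpa using hj)

-- elements of a prefix-suffix segment come from indexed positions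
theorem seg_mem (costs : List Int) (j k : Nat) (y : Int)
    (hy : y ∈ (costs.take k).drop (j+1)) :
    ∃ m, j < m ∧ m < k ∧ m < costs.length ∧ y = costs.getD m 0 := by
  obtain ⟨t, ht, rfl⟩ := List.getElem_of_mem hy
  have ht' : t < min k costs.length - (j+1) := by
    simpa [List.length_drop, List.length_take] using ht
  have hlt : j + 1 + t < (costs.take k).length := by
    simp [List.length_take]; omega
  refine ⟨j + 1 + t, by omega, ?_, ?_, ?_⟩
  · simp [List.length_take] at hlt; omega
  · simp [List.length_take] at hlt; omega
  · have h1 : ((costs.take k).drop (j+1))[t] = (costs.take k)[j+1+t] := by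
      simp [List.getElem_drop]
    have hm : j + 1 + t < costs.length := by simp [List.length_take] at hlt; omega
    have h2 : (costs.take k)[j+1+t]'hlt = costs[j+1+t]'hm := List.getElem_take
    rw [h1, h2, List.getD_eq_getElem costs 0 hm]

theorem seg_succ (costs : List Int) (j i : Nat) (hj : j < i) (hi : i < costs.length) :
    (costs.take (i+1)).drop (j+1) = (costs.take i).drop (j+1) ++ [costs.getD i 0] := by
  rw [List.take_succ]
  have : costs[i]?.toList = [costs.getD i 0] := by
    simp [List.getElem?_eq_getElem hi]
  rw [this, List.drop_append_of_le_length (by simp [List.length_take]; omega)]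

-- pvPopLoop computed via takeWhile/dropWhile
theorem popLoop_eq (costs : List Int) (ci : Int) (st : List Nat) (fin : List Int) :
    pvPopLoop costs ci st fin =
      (st.dropWhile (fun j => decide (costs.getD j 0 ≥ ci)),
       (st.takeWhile (fun j => decide (costs.getD j 0 ≥ ci))).foldl
         (fun f j => f.set j (f.getD j 0 - ci)) fin) := by
  induction st generalizing fin with
  | nil => rfl
  | cons j st ih =>
      simp only [pvPopLoop, List.dropWhile_cons, List.takeWhile_cons, decide_eq_true_eq]
      by_cases h : costs.getD j 0 ≥ ci
      · rw [if_pos h, if_pos h, if_pos h, ih, List.foldl_cons]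
      · rw [if_neg h, if_neg h, if_neg h, List.foldl_nil]

theorem pop_bound (costs : List Int) (ci : Int) (st : List Nat) (fin : List Int)
    (hp : st.Pairwise (fun a b => costs.getD b 0 < costs.getD a 0)) :
    ∀ b ∈ (pvPopLoop costs ci st fin).1, costs.getD b 0 < ci := by
  induction st generalizing fin with
  | nil => simp [pvPopLoop]
  | cons j st ih =>
      by_cases h : costs.getD j 0 ≥ ci
      · simp only [pvPopLoop, if_pos h]
        exact ih _ (List.Pairwise.of_cons hp)
      · simp only [pvPopLoop, if_neg h]
        intro b hb
        rcases List.mem_cons.mp hb with rfl | hb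
        · omega
        · have := (List.pairwise_cons.mp hp).1 b hb
          omega

theorem foldl_set_length (popped : List Nat) (fin : List Int) (ci : Int) :
    (popped.foldl (fun f j => f.set j (f.getD j 0 - ci)) fin).length = fin.length := by
  induction popped generalizing fin with
  | nil => rfl
  | cons j popped ih =>
      rw [List.foldl_cons, ih, List.length_set]

theorem foldl_set_getD (popped : List Nat) (fin : List Int) (ci : Int)
    (hnd : popped.Nodup) (hlt : ∀ j ∈ popped, j < fin.length) (j : Nat) :
    (popped.foldl (fun f j => f.set j (f.getD j 0 - ci)) fin).getD j 0 =
      if j ∈ popped then fin.getD j 0 - ci else fin.getD j 0 := by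
  induction popped generalizing fin with
  | nil => simp
  | cons x popped ih =>
      have hx : x < fin.length := hlt x (by simp)
      have hrec := ih (fin.set x (fin.getD x 0 - ci)) (hnd.of_cons)
        (fun j hj => by simpa using hlt j (by simp [hj]))
      simp only [List.foldl_cons]
      rw [hrec]
      by_cases hj : j ∈ popped
      · have hne : j ≠ x := fun h => (List.nodup_cons.mp hnd).1 (h ▸ hj)
        simp [hj, List.getD, hne.symm]
      · by_cases hjx : j = x
        · subst hjx
          simp [hj, List.getD, hx]
        · simp [hj, hjx, List.getD, Ne.symm hjx]

-- the loop invariant for A's fold, after processing indices 0..k-1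
def StackInv (costs : List Int) (k : Nat) (st : List Nat) (fin : List Int) : Prop :=
  fin.length = costs.length ∧
  st.Pairwise (fun a b => b < a ∧ costs.getD b 0 < costs.getD a 0) ∧
  (∀ j, k ≤ j → fin.getD j 0 = costs.getD j 0) ∧
  (∀ j ∈ st, j < k ∧ fin.getD j 0 = costs.getD j 0 ∧
      ∀ m, j < m → m < k → costs.getD j 0 < costs.getD m 0) ∧
  (∀ j, j < k → j ∉ st →
      ∃ v, firstLE? (costs.getD j 0) ((costs.take k).drop (j+1)) = some v ∧
        fin.getD j 0 = costs.getD j 0 - v)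

theorem inv_step (costs : List Int) (i : Nat) (st : List Nat) (fin : List Int)
    (hinv : StackInv costs i st fin) (hi : i < costs.length) :
    StackInv costs (i+1) (i :: (pvPopLoop costs (costs.getD i 0) st fin).1)
      (pvPopLoop costs (costs.getD i 0) st fin).2 := by
  obtain ⟨hlen, hpw, hge, hst, hres⟩ := hinv
  have hpop := popLoop_eq costs (costs.getD i 0) st fin
  set ci := costs.getD i 0 with hci
  set p := (fun j => decide (costs.getD j 0 ≥ ci)) with hpdef
  set popped := st.takeWhile p with hpopped
  set st' := st.dropWhile p with hst'def
  have hsubd : List.Sublist st' st := List.dropWhile_sublist p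
  have hsubt : List.Sublist popped st := List.takeWhile_sublist p
  have hnodup : st.Nodup := hpw.imp (fun h => ne_of_gt h.1)
  have hnd : popped.Nodup := hnodup.sublist hsubt
  have happend : popped ++ st' = st := List.takeWhile_append_dropWhile
  have hmem_pop : ∀ j ∈ popped, j ∈ st := fun j hj => hsubt.subset hj
  have hmem_st' : ∀ j ∈ st', j ∈ st := fun j hj => hsubd.subset hj
  have hstlt : ∀ j ∈ st, j < i := fun j hj => (hst j hj).1
  have hlt_pop : ∀ j ∈ popped, j < fin.length := fun j hj => by
    have := hstlt j (hmem_pop j hj); omega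
  have hfin' := foldl_set_getD popped fin ci hnd hlt_pop
  have hbound : ∀ b ∈ st', costs.getD b 0 < ci := by
    have h := pop_bound costs ci st fin (hpw.imp (fun h => h.2))
    rw [hpop] at h; exact h
  have hdisj : ∀ j ∈ st', j ∉ popped := by
    intro j hj hjp
    have : (popped ++ st').Nodup := by rw [happend]; exact hnodup
    exact (List.disjoint_of_nodup_append this) hjp hj
  have hpopci : ∀ j ∈ popped, ci ≤ costs.getD j 0 := by
    intro j hj
    have := List.mem_takeWhile_imp hj
    rw [hpdef] at this; simpa using this
  rw [hpop]
  dsimp only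
  refine ⟨?_, ?_, ?_, ?_, ?_⟩
  · rw [foldl_set_length]; exact hlen
  · refine List.pairwise_cons.mpr ⟨fun b hb => ⟨hstlt b (hmem_st' b hb), hbound b hb⟩, hpw.sublist hsubd⟩
  · intro j hj
    rw [hfin' j, if_neg (fun hjp => by have := hstlt j (hmem_pop j hjp); omega)]
    exact hge j (by omega)
  · intro j hj
    rcases List.mem_cons.mp hj with rfl | hj
    · refine ⟨Nat.lt_succ_self j, ?_, ?_⟩
      · rw [hfin' j, if_neg (fun hjp => by have := hstlt j (hmem_pop j hjp); omega)]
        exact hge j le_rfl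
      · intro m hm1 hm2; omega
    · obtain ⟨hji, hfj, hnom⟩ := hst j (hmem_st' j hj)
      refine ⟨by omega, ?_, ?_⟩
      · rw [hfin' j, if_neg (hdisj j hj)]; exact hfj
      · intro m hm1 hm2
        by_cases hmi : m = i
        · subst hmi; exact hbound j hj
        · exact hnom m hm1 (by omega)
  · intro j hj hjn
    have hjne : j ≠ i := fun h => hjn (h ▸ List.mem_cons_self ..)
    have hjns : j ∉ st' := fun h => hjn (List.mem_cons_of_mem _ h)
    have hji : j < i := by omega
    by_cases hjp : j ∈ popped
    · obtain ⟨_, hfj, hnom⟩ := hst j (hmem_pop j hjp)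
      refine ⟨ci, ?_, ?_⟩
      · rw [seg_succ costs j i hji hi]
        have hnone : firstLE? (costs.getD j 0) ((costs.take i).drop (j+1)) = none := by
          refine firstLE?_eq_none (fun y hy => ?_)
          obtain ⟨m, hm1, hm2, hm3, rfl⟩ := seg_mem costs j i y hy
          have := hnom m hm1 hm2; omega
        rw [firstLE?_append_none hnone]
        simp only [firstLE?]
        rw [if_pos (show costs.getD i 0 ≤ costs.getD j 0 from hpopci j hjp)]
      · rw [hfin' j, if_pos hjp, hfj]
    · have hjst : j ∉ st := by
        intro h; rw [← happend] at h
        rcases List.mem_append.mp h with h | h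
        · exact hjp h
        · exact hjns h
      obtain ⟨v, hv, hfv⟩ := hres j hji hjst
      refine ⟨v, ?_, ?_⟩
      · rw [seg_succ costs j i hji hi]
        exact firstLE?_append_some hv
      · rw [hfin' j, if_neg hjp]; exact hfv

theorem main_inv (costs : List Int) (k : Nat) (hk : k ≤ costs.length) :
    StackInv costs k
      (((List.range k).foldl
        (fun s i =>
          let p := pvPopLoop costs (costs.getD i 0) s.1 s.2
          (i :: p.1, p.2))
        (([] : List Nat), costs)).1)
      (((List.range k).foldl
        (fun s i =>
          let p := pvPopLoop costs (costs.getD i 0) s.1 s.2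
          (i :: p.1, p.2))
        (([] : List Nat), costs)).2) := by
  induction k with
  | zero =>
      refine ⟨rfl, by simp, fun j _ => rfl, by simp, by simp⟩
  | succ k ih =>
      have hk' : k < costs.length := hk
      have ihk := ih (le_of_lt hk')
      rw [List.range_succ, List.foldl_append, List.foldl_cons, List.foldl_nil]
      exact inv_step costs k _ _ ihk hk'

theorem final_eq (costs : List Int) :
    final_supply_costs costs = final_supply_costs_alt costs := by
  have h := main_inv costs costs.length le_rfl
  obtain ⟨hlen, _, _, hst, hres⟩ := h
  unfold final_supply_costs
  apply List.ext_getElem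
  · rw [hlen, alt_length]
  · intro j h1 h2
    have hj : j < costs.length := by rwa [hlen] at h1
    rw [← List.getD_eq_getElem _ 0 h1, ← List.getD_eq_getElem _ 0 h2]
    rw [alt_getD costs j (by rwa [alt_length] at h2)]
    by_cases hjs : j ∈ (((List.range costs.length).foldl
        (fun s i =>
          let p := pvPopLoop costs (costs.getD i 0) s.1 s.2
          (i :: p.1, p.2))
        (([] : List Nat), costs)).1)
    · obtain ⟨_, hfj, hnom⟩ := hst j hjs
      rw [hfj]
      have hdrop : costs.drop (j+1) = (costs.take costs.length).drop (j+1) := by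
        rw [List.take_length]
      have hzero : pvFindLE (costs.getD j 0) (costs.drop (j+1)) = 0 := by
        refine pvFindLE_of_firstLE?_none (firstLE?_eq_none (fun y hy => ?_))
        rw [hdrop] at hy
        obtain ⟨m, hm1, hm2, hm3, rfl⟩ := seg_mem costs j costs.length y hy
        have := hnom m hm1 hm2; omega
      rw [hzero]; ring
    · obtain ⟨v, hv, hfv⟩ := hres j hj hjs
      rw [hfv]
      rw [List.take_length] at hv
      rw [pvFindLE_of_firstLE?_some hv]

-- ===== VERDICT (by name: the statement is the Claim_ definition above) =====
theorem final_supply_costs_spec : Claim_equal_final_supply_costs := by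
  intro costs _
  exact final_eq costs
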